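-- pv_equiv track=rewrite | github.com/dev-moshpit/x-video-engine | xvideo/pack_init.py | _shape_rows
-- ===== SOURCE A (Python) =====
-- def _shape_rows(rows: list[dict], pack_name: str, n: int | None) -> list[dict]:
--     """Return exactly n rows, or all rows if n is None.
--
--     n > len(rows): cycle template rows with unique id suffixes (`_v2`, `_v3`…)
--     n < len(rows): take first n
--     """
--     if n is None or n == len(rows):
--         return [dict(r) for r in rows]
--     if n <= 0:
--         raise ValueError("--rows must be positive")
--     if n < len(rows):
--         return [dict(r) for r in rows[:n]]
--     out: list[dict] = []
--     for i in range(n):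
--         base = dict(rows[i % len(rows)])
--         cycle = i // len(rows)
--         if cycle > 0:
--             rid = (base.get("id") or f"{pack_name}_row{i+1}").strip()
--             base["id"] = f"{rid}_v{cycle+1}"
--         out.append(base)
--     return out
-- ===== SOURCE B (Python) =====
-- def _shape_rows(rows, pack_name, n):
--     if n is None or n == len(rows):
--         return [dict(r) for r in rows]
--     if n <= 0:
--         raise ValueError("--rows must be positive")
--     if n < len(rows):
--         return [dict(r) for r in rows[:n]]
--     L = len(rows)
--
--     def stamped_pass(cycle, count):
--         chunk = []
--         for j in range(count):
--             base = dict(rows[j])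
--             rid = (base.get("id") or f"{pack_name}_row{cycle * L + j + 1}").strip()
--             base["id"] = f"{rid}_v{cycle + 1}"
--             chunk.append(base)
--         return chunk
--
--     full, rem = divmod(n - L, L)
--     out = [dict(r) for r in rows]
--     for cycle in range(1, full + 1):
--         out += stamped_pass(cycle, L)
--     out += stamped_pass(full + 1, rem)
--     return out
-- ===== Notes on version B (the rewrite author's own statement) =====
-- stated objective: alternative
-- what changed: A stamps each output row from a flat index loop using i % len(rows) and i // len(rows); B copies the first pass verbatim, then builds whole stamped passes per cycle (no div/mod per element) and truncates with out[:n].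
import Mathlib
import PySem

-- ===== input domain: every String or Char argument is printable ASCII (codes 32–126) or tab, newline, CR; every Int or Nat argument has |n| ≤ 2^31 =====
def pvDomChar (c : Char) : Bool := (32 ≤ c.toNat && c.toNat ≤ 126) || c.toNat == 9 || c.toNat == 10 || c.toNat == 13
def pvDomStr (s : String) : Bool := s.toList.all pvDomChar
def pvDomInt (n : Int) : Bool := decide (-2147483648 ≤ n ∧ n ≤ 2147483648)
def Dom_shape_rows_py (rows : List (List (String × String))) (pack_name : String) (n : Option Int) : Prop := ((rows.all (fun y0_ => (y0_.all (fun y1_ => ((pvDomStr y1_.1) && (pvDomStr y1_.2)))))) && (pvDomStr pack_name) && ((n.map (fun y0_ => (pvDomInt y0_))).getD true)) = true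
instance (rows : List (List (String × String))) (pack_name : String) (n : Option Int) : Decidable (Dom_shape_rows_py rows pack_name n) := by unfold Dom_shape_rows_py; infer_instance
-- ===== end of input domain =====

-- B replaces A's flat index loop (i % L, i // L) by a per-cycle decomposition (first pass copied
-- verbatim, then whole stamped passes, truncated with out[:n]); objective: alternative decomposition.

-- ===== PORT A =====
-- A's `base.get("id") or f"..."` is ported via getD "id" "" plus an emptiness test: None and "" are both falsy.
def shape_rows_py (rows : List (List (String × String))) (pack_name : String) (n : Option Int) : List (List (String × String)) :=
  match n with
  | none => rows.map (fun r => (PySem.Dict.ofList r).items)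
  | some k =>
    if k = (rows.length : Int) then rows.map (fun r => (PySem.Dict.ofList r).items)
    else if k ≤ 0 then []  -- Python raises ValueError here; excluded by Pre_
    else if k < (rows.length : Int) then
      (PySem.List.slice rows none (some k)).map (fun r => (PySem.Dict.ofList r).items)
    else
      -- Python raises ZeroDivisionError when rows = []; excluded by Pre_ (the pyGetD default is unreachable under Pre_)
      (PySem.List.pyRange 0 k 1).foldl (fun out i =>
        let base := PySem.Dict.ofList (PySem.List.pyGetD rows (PySem.Int.mod i (rows.length : Int)) [])
        let cycle := PySem.Int.floordiv i (rows.length : Int)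
        if 0 < cycle then
          let rid := PySem.Str.strip (if base.getD "id" "" = "" then pack_name ++ "_row" ++ PySem.Int.toStr (i + 1) else base.getD "id" "")
          out ++ [(base.insert "id" (rid ++ "_v" ++ PySem.Int.toStr (cycle + 1))).items]
        else out ++ [base.items]) []

-- ===== PORT B =====
-- B helper: stamped_pass cycle count (closure over rows, pack_name, L = len(rows))
def pvStampedPass (rows : List (List (String × String))) (pack_name : String) (cycle : Int) (count : Int) : List (List (String × String)) :=
  let L : Int := rows.length
  (PySem.List.pyRange 0 count 1).foldl (fun chunk j =>
    let base := PySem.Dict.ofList (PySem.List.pyGetD rows j [])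
    let rid := PySem.Str.strip (if base.getD "id" "" = "" then pack_name ++ "_row" ++ PySem.Int.toStr (cycle * L + j + 1) else base.getD "id" "")
    chunk ++ [(base.insert "id" (rid ++ "_v" ++ PySem.Int.toStr (cycle + 1))).items]) []

def shape_rows_py_alt (rows : List (List (String × String))) (pack_name : String) (n : Option Int) : List (List (String × String)) :=
  match n with
  | none => rows.map (fun r => (PySem.Dict.ofList r).items)
  | some k =>
    if k = (rows.length : Int) then rows.map (fun r => (PySem.Dict.ofList r).items)
    else if k ≤ 0 then []  -- Python raises ValueError here; excluded by Pre_
    else if k < (rows.length : Int) then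
      (PySem.List.slice rows none (some k)).map (fun r => (PySem.Dict.ofList r).items)
    else
      -- Python raises ZeroDivisionError (divmod(n - L, 0)) when rows = []; excluded by Pre_
      let L : Int := rows.length
      let full := PySem.Int.floordiv (k - L) L
      let rem := PySem.Int.mod (k - L) L
      let out := rows.map (fun r => (PySem.Dict.ofList r).items)
      let out := (PySem.List.pyRange 1 (full + 1) 1).foldl (fun out cycle =>
        out ++ pvStampedPass rows pack_name cycle L) out
      out ++ pvStampedPass rows pack_name (full + 1) rem

-- ===== PRECONDITION & SPEC =====
-- Pre_ excludes exactly the inputs where Python A raises: n ≤ 0 (ValueError) and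
-- n > 0 with n ≠ len(rows) on empty rows (ZeroDivisionError from i % 0).
def Pre_shape_rows_py (rows : List (List (String × String))) (pack_name : String) (n : Option Int) : Prop :=
  (n.getD (rows.length : Int) = (rows.length : Int)) ∨ (0 < n.getD 0 ∧ rows ≠ [])
instance (rows : List (List (String × String))) (pack_name : String) (n : Option Int) : Decidable (Pre_shape_rows_py rows pack_name n) := by unfold Pre_shape_rows_py; infer_instance
def pvWitness_shape_rows_py : (List (List (String × String))) × String × Option Int :=
  ([[("id", " a "), ("txt", "hi")], [("txt", "yo")]], "pk", some 5)
def Spec_shape_rows_py (rows : List (List (String × String))) (pack_name : String) (n : Option Int) (out : List (List (String × String))) : Prop := out = shape_rows_py_alt rows pack_name n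
instance (rows : List (List (String × String))) (pack_name : String) (n : Option Int) (out : List (List (String × String))) : Decidable (Spec_shape_rows_py rows pack_name n out) := by unfold Spec_shape_rows_py; infer_instance

-- ===== CLAIM (what is proved, stated in full; the proofs are below) =====
def Claim_equal_shape_rows_py : Prop := ∀ (rows : List (List (String × String))) (pack_name : String) (n : Option Int), Dom_shape_rows_py rows pack_name n → Pre_shape_rows_py rows pack_name n → Spec_shape_rows_py rows pack_name n (shape_rows_py rows pack_name n)

-- ===== LEMMAS AND PROOFS =====

-- the item A's loop produces at flat index i
def pvItem (rows : List (List (String × String))) (pack_name : String) (i : Int) : List (String × String) :=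
  let base := PySem.Dict.ofList (PySem.List.pyGetD rows (PySem.Int.mod i (rows.length : Int)) [])
  let cycle := PySem.Int.floordiv i (rows.length : Int)
  if 0 < cycle then
    let rid := PySem.Str.strip (if base.getD "id" "" = "" then pack_name ++ "_row" ++ PySem.Int.toStr (i + 1) else base.getD "id" "")
    (base.insert "id" (rid ++ "_v" ++ PySem.Int.toStr (cycle + 1))).items
  else base.items

-- the item B's inner loop produces in pass c for the enumerated pair jr
def pvStamp (pack_name : String) (L : Int) (c : Int) (jr : Int × List (String × String)) : List (String × String) :=
  let base := PySem.Dict.ofList jr.2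
  let rid := PySem.Str.strip (if base.getD "id" "" = "" then pack_name ++ "_row" ++ PySem.Int.toStr (c * L + jr.1 + 1) else base.getD "id" "")
  (base.insert "id" (rid ++ "_v" ++ PySem.Int.toStr (c + 1))).items

theorem pvGet (rows : List (List (String × String))) (j : Nat) (hj : j < rows.length) :
    PySem.List.pyGetD rows (j : Int) [] = rows[j] := by
  rw [PySem.List.pyGetD_eq_getElem rows ([]) (by positivity) (by exact_mod_cast hj)]
  simp

theorem pvItem_lt (rows : List (List (String × String))) (pack_name : String) (j : Nat)
    (hj : j < rows.length) :
    pvItem rows pack_name (j : Int) = (PySem.Dict.ofList rows[j]).items := by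
  have hL : (0 : Int) < (rows.length : Int) := by
    exact_mod_cast Nat.lt_of_le_of_lt (Nat.zero_le j) hj
  have hfd : PySem.Int.floordiv (j : Int) (rows.length : Int) = 0 := by
    rw [PySem.Int.floordiv_eq_iff_of_pos hL]
    constructor <;> simp <;> omega
  have hmod : PySem.Int.mod (j : Int) (rows.length : Int) = (j : Int) := by
    have h := PySem.Int.floordiv_mul_add_mod (j : Int) (rows.length : Int)
    rw [hfd] at h; linarith
  unfold pvItem
  rw [hmod, hfd, pvGet rows j hj]
  simp

theorem pvItem_ge (rows : List (List (String × String))) (pack_name : String) (c j : Nat)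
    (hc : 0 < c) (hj : j < rows.length) :
    pvItem rows pack_name ((c * rows.length + j : Nat) : Int)
      = pvStamp pack_name (rows.length : Int) (c : Int) ((j : Int), rows[j]) := by
  have hL : (0 : Int) < (rows.length : Int) := by
    exact_mod_cast Nat.lt_of_le_of_lt (Nat.zero_le j) hj
  have hfd : PySem.Int.floordiv ((c * rows.length + j : Nat) : Int) (rows.length : Int) = (c : Int) := by
    rw [PySem.Int.floordiv_eq_iff_of_pos hL]
    have h1 : c * rows.length + j < (c + 1) * rows.length := by
      have : (c + 1) * rows.length = c * rows.length + rows.length := by ring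
      omega
    constructor
    · push_cast; nlinarith
    · exact_mod_cast h1
  have hmod : PySem.Int.mod ((c * rows.length + j : Nat) : Int) (rows.length : Int) = (j : Int) := by
    have h := PySem.Int.floordiv_mul_add_mod ((c * rows.length + j : Nat) : Int) (rows.length : Int)
    rw [hfd] at h; push_cast at h ⊢; linarith
  unfold pvItem pvStamp
  rw [hmod, hfd, pvGet rows j hj]
  dsimp only
  rw [if_pos (by exact_mod_cast hc)]
  have harg : ((c * rows.length + j : Nat) : Int) + 1 = (c : Int) * (rows.length : Int) + (j : Int) + 1 := by
    push_cast; ring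
  rw [harg]

-- chunking List.range into consecutive blocks of length L
theorem pvRangeFlat (F : Nat → List (String × String)) (L : Nat) (C : Nat) :
    (List.range (C * L)).map F
      = (List.range C).flatMap (fun c => (List.range L).map (fun j => F (c * L + j))) := by
  induction C with
  | zero => simp
  | succ c ih =>
    rw [Nat.succ_mul, List.range_add, List.map_append, ih, List.range_succ, List.flatMap_append]
    simp [Function.comp_def]

-- one stamped pass is a slice of A's per-index items
theorem pvPass (rows : List (List (String × String))) (pack_name : String) (cn t : Nat)
    (hc : 0 < cn) (ht : t ≤ rows.length) :
    pvStampedPass rows pack_name (cn : Int) (t : Int)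
      = (List.range t).map (fun (j : Nat) => pvItem rows pack_name ((cn * rows.length + j : Nat) : Int)) := by
  unfold pvStampedPass
  rw [PySem.List.foldl_congr_mem _ _ (fun chunk (j : Int) => chunk ++
      [((PySem.Dict.ofList (PySem.List.pyGetD rows j [])).insert "id"
        (PySem.Str.strip (if (PySem.Dict.ofList (PySem.List.pyGetD rows j [])).getD "id" "" = "" then
            pack_name ++ "_row" ++ PySem.Int.toStr ((cn : Int) * (rows.length : Int) + j + 1)
          else (PySem.Dict.ofList (PySem.List.pyGetD rows j [])).getD "id" "")
          ++ "_v" ++ PySem.Int.toStr ((cn : Int) + 1))).items]) _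
    (by intro acc x _; rfl)]
  rw [PySem.List.foldl_append_singleton_eq_map, List.nil_append, PySem.List.pyRange_zero, List.map_map]
  apply List.map_congr_left
  intro j hj
  have hjt : j < t := List.mem_range.mp hj
  have hjr : j < rows.length := Nat.lt_of_lt_of_le hjt ht
  rw [Function.comp_apply, pvGet rows j hjr,
    pvItem_ge rows pack_name cn j hc hjr]
  unfold pvStamp
  dsimp only

-- the full B prefix (first pass plus all whole stamped passes) is A's map over range ((Fn+1)*L)
theorem pvFull (rows : List (List (String × String))) (pack_name : String) (Fn : Nat)
    (hL : 0 < rows.length) :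
    rows.map (fun r => (PySem.Dict.ofList r).items)
        ++ (PySem.List.pyRange 1 ((Fn : Int) + 1) 1).flatMap
            (fun c => pvStampedPass rows pack_name c (rows.length : Int))
      = (List.range ((Fn + 1) * rows.length)).map (fun (j : Nat) => pvItem rows pack_name (j : Int)) := by
  rw [pvRangeFlat, List.range_succ_eq_map, List.flatMap_cons, List.flatMap_map]
  congr 1
  · apply List.ext_getElem
    · simp
    · intro i h1 h2
      simp only [List.getElem_map, List.getElem_range, Nat.zero_mul, Nat.zero_add]
      rw [pvItem_lt rows pack_name i (by simpa using h1)]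
  · rw [PySem.List.pyRange_one]
    have hlen : ((Fn : Int) + 1 - 1).toNat = Fn := by omega
    rw [hlen, List.flatMap_map]
    congr 1
    funext m
    have hcast : (1 : Int) + (m : Int) = ((Nat.succ m : Nat) : Int) := by push_cast; ring
    rw [hcast, pvPass rows pack_name (Nat.succ m) rows.length (Nat.succ_pos m) (Nat.le_refl _)]

-- the main branch: A's flat loop equals B's per-cycle construction
set_option maxHeartbeats 1000000 in
theorem pvMain (rows : List (List (String × String))) (pack_name : String) (k : Int)
    (hne : rows ≠ []) (hk : (rows.length : Int) < k) :
    (PySem.List.pyRange 0 k 1).foldl (fun out i =>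
        let base := PySem.Dict.ofList (PySem.List.pyGetD rows (PySem.Int.mod i (rows.length : Int)) [])
        let cycle := PySem.Int.floordiv i (rows.length : Int)
        if 0 < cycle then
          let rid := PySem.Str.strip (if base.getD "id" "" = "" then pack_name ++ "_row" ++ PySem.Int.toStr (i + 1) else base.getD "id" "")
          out ++ [(base.insert "id" (rid ++ "_v" ++ PySem.Int.toStr (cycle + 1))).items]
        else out ++ [base.items]) []
      = ((PySem.List.pyRange 1 (PySem.Int.floordiv (k - (rows.length : Int)) (rows.length : Int) + 1) 1).foldl
          (fun out cycle => out ++ pvStampedPass rows pack_name cycle (rows.length : Int))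
          (rows.map (fun r => (PySem.Dict.ofList r).items)))
        ++ pvStampedPass rows pack_name (PySem.Int.floordiv (k - (rows.length : Int)) (rows.length : Int) + 1)
            (PySem.Int.mod (k - (rows.length : Int)) (rows.length : Int)) := by
  have hL : 0 < rows.length := List.length_pos_of_ne_nil hne
  have hLint : (0 : Int) < (rows.length : Int) := by exact_mod_cast hL
  set F : Int := PySem.Int.floordiv (k - (rows.length : Int)) (rows.length : Int) with hFdef
  set R : Int := PySem.Int.mod (k - (rows.length : Int)) (rows.length : Int) with hRdef
  have hfr : F * (rows.length : Int) + R = k - (rows.length : Int) :=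
    PySem.Int.floordiv_mul_add_mod _ _
  have hR0 : 0 ≤ R := PySem.Int.mod_nonneg _ hLint
  have hR1 : R < (rows.length : Int) := PySem.Int.mod_lt _ hLint
  have hF0 : 0 ≤ F := by
    by_contra hcon
    have h0 : F ≤ -1 := by omega
    have := mul_le_mul_of_nonneg_right h0 (le_of_lt hLint)
    simp at this
    nlinarith
  -- A side: foldl → map over range k.toNat
  have hA : ∀ (init : List (List (String × String))),
      (PySem.List.pyRange 0 k 1).foldl (fun out i =>
        let base := PySem.Dict.ofList (PySem.List.pyGetD rows (PySem.Int.mod i (rows.length : Int)) [])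
        let cycle := PySem.Int.floordiv i (rows.length : Int)
        if 0 < cycle then
          let rid := PySem.Str.strip (if base.getD "id" "" = "" then pack_name ++ "_row" ++ PySem.Int.toStr (i + 1) else base.getD "id" "")
          out ++ [(base.insert "id" (rid ++ "_v" ++ PySem.Int.toStr (cycle + 1))).items]
        else out ++ [base.items]) init
      = init ++ (PySem.List.pyRange 0 k 1).map (pvItem rows pack_name) := by
    intro init
    rw [PySem.List.foldl_congr_mem _ _ (fun out i => out ++ [pvItem rows pack_name i]) _
      (by intro acc x _; unfold pvItem; dsimp only; split <;> rfl)]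
    exact PySem.List.foldl_append_singleton_eq_map _ _ _
  rw [hA, List.nil_append, PySem.List.foldl_append_eq_flatMap, PySem.List.pyRange_zero, List.map_map]
  -- split range k.toNat into the full prefix and the partial pass
  have hksplit : k.toNat = (F.toNat + 1) * rows.length + R.toNat := by
    have h1 : (((F.toNat + 1) * rows.length + R.toNat : Nat) : Int) = k := by
      push_cast [Int.toNat_of_nonneg hF0, Int.toNat_of_nonneg hR0]
      linarith
    omega
  rw [hksplit, List.range_add, List.map_append, List.map_map]
  have hFcast : ((F.toNat : Nat) : Int) = F := Int.toNat_of_nonneg hF0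
  have hRcast : ((R.toNat : Nat) : Int) = R := Int.toNat_of_nonneg hR0
  congr 1
  · have h := pvFull rows pack_name F.toNat hL
    rw [hFcast] at h
    exact h.symm
  · have hcc : F + 1 = ((F.toNat + 1 : Nat) : Int) := by push_cast [hFcast]; ring
    rw [hcc, ← hRcast,
      pvPass rows pack_name (F.toNat + 1) R.toNat (Nat.succ_pos _) (by omega)]
    apply List.map_congr_left
    intro j hj
    rfl

theorem shape_rows_py_spec : Claim_equal_shape_rows_py := by
  intro rows pack_name n hdom hpre
  unfold Spec_shape_rows_py
  cases n with
  | none => rfl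
  | some k =>
    simp only [shape_rows_py, shape_rows_py_alt]
    by_cases h1 : k = (rows.length : Int)
    · simp [h1]
    by_cases h2 : k ≤ 0
    · simp [h1, h2]
    by_cases h3 : k < (rows.length : Int)
    · simp [h1, h2, h3]
    · simp only [if_neg h1, if_neg h2, if_neg h3]
      have hne : rows ≠ [] := by
        rcases hpre with h | h
        · exact absurd (by simpa using h) h1
        · exact h.2
      exact pvMain rows pack_name k hne (by omega)
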